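-- pv_equiv track=rewrite | github.com/russellmiller49/Procedure_suite | scripts/distill_phi_labels.py | repair_bio
-- ===== SOURCE A (Python) =====
-- def repair_bio(tags: list[str]) -> list[str]:
--     if not tags:
--         return tags
--     repaired = list(tags)
--     prev_label = "O"
--     for idx, tag in enumerate(repaired):
--         if tag == "O":
--             prev_label = "O"
--             continue
--         if not tag.startswith(("B-", "I-")):
--             prev_label = "O"
--             continue
--         label = tag[2:]
--         if tag.startswith("I-") and (prev_label == "O" or prev_label != label):
--             repaired[idx] = f"B-{label}"
--         prev_label = repaired[idx][2:] if repaired[idx] != "O" else "O"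
--     return repaired
-- ===== SOURCE B (Python) =====
-- def repair_bio(tags: list[str]) -> list[str]:
--     def eff(tag: str) -> str:
--         return tag[2:] if tag.startswith(("B-", "I-")) else "O"
--
--     def fix(idx: int, tag: str) -> str:
--         if not tag.startswith("I-"):
--             return tag
--         label = tag[2:]
--         prev_label = eff(tags[idx - 1]) if idx else "O"
--         return f"B-{label}" if prev_label == "O" or prev_label != label else tag
--
--     return [fix(idx, tag) for idx, tag in enumerate(tags)]
-- ===== Notes on version B (the rewrite author's own statement) =====
-- stated objective: alternative
-- what changed: Replaces A's prev_label accumulator loop (with in-place list mutation) by a stateless per-index map that recomputes the previous effective label by looking back at the previous ORIGINAL tag, which is valid because a repair never changes a tag's label suffix.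
import Mathlib
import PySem

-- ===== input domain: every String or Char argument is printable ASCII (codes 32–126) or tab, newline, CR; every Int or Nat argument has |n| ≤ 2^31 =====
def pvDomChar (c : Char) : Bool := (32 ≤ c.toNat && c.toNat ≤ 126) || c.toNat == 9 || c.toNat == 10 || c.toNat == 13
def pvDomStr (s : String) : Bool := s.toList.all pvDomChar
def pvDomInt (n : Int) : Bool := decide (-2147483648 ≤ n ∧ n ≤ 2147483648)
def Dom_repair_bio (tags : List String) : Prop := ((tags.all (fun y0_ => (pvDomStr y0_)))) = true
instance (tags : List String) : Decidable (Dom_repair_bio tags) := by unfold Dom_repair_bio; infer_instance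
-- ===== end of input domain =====

-- B replaces A's prev_label accumulator by a stateless per-index map that looks back at the
-- previous ORIGINAL tag (valid because a repair never changes a tag's label); objective: alternative decomposition.

-- ===== PORT A =====
-- A's loop over `repaired` with the `prev_label` accumulator, transcribed as structural recursion.
def repairAGo : List String → String → List String
  | [], _ => []
  | tag :: rest, prev =>
    if tag == "O" then
      tag :: repairAGo rest "O"
    else if !(PySem.Str.startswith tag "B-" || PySem.Str.startswith tag "I-") then
      tag :: repairAGo rest "O"
    else
      let label := PySem.Str.slice tag (some 2) none
      let newTag :=
        if PySem.Str.startswith tag "I-" && (prev == "O" || prev != label) then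
          "B-" ++ label
        else tag
      newTag :: repairAGo rest (if newTag != "O" then PySem.Str.slice newTag (some 2) none else "O")

def repair_bio (tags : List String) : List String :=
  if tags.isEmpty then tags else repairAGo tags "O"

-- ===== PORT B =====
-- Source B's helper eff(tag): the effective label a tag contributes.
def pvEff (tag : String) : String :=
  if PySem.Str.startswith tag "B-" || PySem.Str.startswith tag "I-" then
    PySem.Str.slice tag (some 2) none
  else "O"

-- Source B's helper fix(idx, tag): looks back at tags[idx-1] (the original list).
def pvFix (tags : List String) (idx : Int) (tag : String) : String :=
  if !PySem.Str.startswith tag "I-" then tag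
  else
    let label := PySem.Str.slice tag (some 2) none
    let prevLabel := if idx != 0 then pvEff (PySem.List.pyGetD tags (idx - 1) "O") else "O"
    if prevLabel == "O" || prevLabel != label then "B-" ++ label else tag

def repair_bio_alt (tags : List String) : List String :=
  (PySem.List.enumerate tags 0).map (fun p => pvFix tags p.1 p.2)

-- ===== PRECONDITION & SPEC =====
def Spec_repair_bio (tags : List String) (out : List String) : Prop := out = repair_bio_alt tags
instance (tags : List String) (out : List String) : Decidable (Spec_repair_bio tags out) := by unfold Spec_repair_bio; infer_instance

-- ===== CLAIM (what is proved, stated in full; the proofs are below) =====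
def Claim_equal_repair_bio : Prop := ∀ (tags : List String), Dom_repair_bio tags → Spec_repair_bio tags (repair_bio tags)

-- ===== LEMMAS AND PROOFS =====

-- the per-element result, given the current tag and the previous effective label
def pvOut (t pl : String) : String :=
  if PySem.Str.startswith t "I-" then
    if pl == "O" || pl != PySem.Str.slice t (some 2) none then
      "B-" ++ PySem.Str.slice t (some 2) none
    else t
  else t

-- the previous effective label seen from index i (p at i = 0)
def pvPrev (l : List String) (p : String) (i : Nat) : String :=
  if i = 0 then p else pvEff (l[i-1]?.getD "O")

-- accumulator-style reference version both ports are compared against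
def pvMap : List String → String → List String
  | [], _ => []
  | t :: rest, p => pvOut t p :: pvMap rest (pvEff t)

lemma pv_startswith_O_I : PySem.Str.startswith "O" "I-" = false := by decide
lemma pv_O_not_BI : (PySem.Str.startswith "O" "B-" || PySem.Str.startswith "O" "I-") = false := by decide

lemma pv_append_ne_O (s : String) : ("B-" ++ s) ≠ "O" := by
  intro he
  have := congrArg String.toList he
  simp at this

lemma pv_slice_append (s : String) : PySem.Str.slice ("B-" ++ s) (some 2) none = s := by
  apply String.toList_inj.mp
  rw [PySem.Str.toList_slice]
  simp [PySem.Chars.slice_eq_listSlice, PySem.List.slice_from _ (by norm_num : (0:Int) ≤ 2)]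

lemma pvOut_not_I (t p : String) (h : PySem.Str.startswith t "I-" = false) : pvOut t p = t := by
  unfold pvOut
  rw [if_neg (by rw [h]; simp)]

lemma pvOut_I (t p : String) (h : PySem.Str.startswith t "I-" = true) :
    pvOut t p =
      if (p == "O" || p != PySem.Str.slice t (some 2) none) = true then
        "B-" ++ PySem.Str.slice t (some 2) none
      else t := by
  unfold pvOut
  rw [if_pos h]

lemma pvEff_not (t : String)
    (h : (PySem.Str.startswith t "B-" || PySem.Str.startswith t "I-") = false) : pvEff t = "O" := by
  unfold pvEff
  rw [if_neg (by rw [h]; simp)]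

lemma pvEff_yes (t : String)
    (h : (PySem.Str.startswith t "B-" || PySem.Str.startswith t "I-") = true) :
    pvEff t = PySem.Str.slice t (some 2) none := by
  unfold pvEff
  rw [if_pos h]

lemma pvA_eq_pvMap : ∀ (l : List String) (p : String), repairAGo l p = pvMap l p := by
  intro l
  induction l with
  | nil => intro p; rfl
  | cons t rest ih =>
    intro p
    simp only [repairAGo, pvMap]
    by_cases hO : t = "O"
    · subst hO
      rw [if_pos (by decide), pvOut_not_I _ p pv_startswith_O_I, pvEff_not _ pv_O_not_BI, ih]
    · rw [if_neg (by simpa using hO)]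
      cases hBI : (PySem.Str.startswith t "B-" || PySem.Str.startswith t "I-") with
      | false =>
        rw [if_pos (show ((!false) = true) from rfl)]
        have hI : PySem.Str.startswith t "I-" = false := (Bool.or_eq_false_iff.mp hBI).2
        rw [pvOut_not_I _ p hI, pvEff_not _ hBI, ih]
      | true =>
        rw [if_neg (show ¬ ((!true) = true) by simp)]
        have htO : (t != "O") = true := by simpa using hO
        cases hI : PySem.Str.startswith t "I-" with
        | false =>
          rw [pvOut_not_I _ p hI]
          simp only [Bool.false_and, Bool.false_eq_true, if_false]
          rw [if_pos htO, ih, pvEff_yes _ hBI]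
        | true =>
          rw [pvOut_I _ p hI]
          simp only [Bool.true_and]
          by_cases hc : (p == "O" || p != PySem.Str.slice t (some 2) none) = true
          · rw [if_pos hc,
                if_pos (by simpa using pv_append_ne_O (PySem.Str.slice t (some 2) none)),
                pv_slice_append, ih, pvEff_yes _ hBI]
          · rw [if_neg hc, if_pos htO, ih, pvEff_yes _ hBI]

lemma pvMap_getElem? : ∀ (l : List String) (p : String) (i : Nat),
    (pvMap l p)[i]? = l[i]?.map (fun t => pvOut t (pvPrev l p i)) := by
  intro l
  induction l with
  | nil => intro p i; rfl
  | cons t rest ih =>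
    intro p i
    cases i with
    | zero => simp [pvMap, pvPrev]
    | succ j =>
      simp only [pvMap, List.getElem?_cons_succ, ih]
      cases j with
      | zero => simp [pvPrev]
      | succ k => simp [pvPrev]

lemma pvFix_eq (tags : List String) (i : Nat) (t : String) :
    pvFix tags (i : Int) t = pvOut t (pvPrev tags "O" i) := by
  cases hI : PySem.Str.startswith t "I-" with
  | false =>
    unfold pvFix
    have hnb : (!PySem.Str.startswith t "I-") = true := by rw [hI]; rfl
    rw [if_pos hnb, pvOut_not_I _ _ hI]
  | true =>
    unfold pvFix
    have hnb : ¬ ((!PySem.Str.startswith t "I-") = true) := by rw [hI]; simp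
    rw [if_neg hnb, pvOut_I _ _ hI]
    by_cases hi : i = 0
    · subst hi
      simp only [Nat.cast_zero, bne_self_eq_false, Bool.false_eq_true, if_false]
      unfold pvPrev
      rw [if_pos rfl]
    · have hne : (((i : Nat) : Int) != 0) = true := by
        simp only [bne_iff_ne, ne_eq]
        omega
      rw [if_pos hne]
      unfold pvPrev
      rw [if_neg hi]
      have hcast : ((i : Nat) : Int) - 1 = ((i - 1 : Nat) : Int) := by omega
      rw [hcast, PySem.List.pyGetD_natCast, List.getD_eq_getElem?_getD]

lemma pvAlt_getElem? (tags : List String) (i : Nat) :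
    (repair_bio_alt tags)[i]? = tags[i]?.map (fun t => pvOut t (pvPrev tags "O" i)) := by
  unfold repair_bio_alt
  rw [List.getElem?_map, PySem.List.getElem?_enumerate]
  cases h : tags[i]? with
  | none => rfl
  | some t => simp [pvFix_eq]

-- ===== VERDICT (by name: the statement is the Claim_ definition above) =====
theorem repair_bio_spec : Claim_equal_repair_bio := by
  intro tags _
  unfold Spec_repair_bio repair_bio
  by_cases he : tags.isEmpty
  · rw [if_pos he]
    rw [List.isEmpty_iff] at he
    subst he; rfl
  · rw [if_neg he, pvA_eq_pvMap]
    apply List.ext_getElem?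
    intro i
    rw [pvMap_getElem?, pvAlt_getElem?]
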